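-- pv_equiv track=rewrite | github.com/Leoendithas/CrossContextMCP | crosscontext-mcp/src/trust_safety/access_control.py | get_max_classification
-- ===== SOURCE A (Python) =====
-- from typing import Dict, List, Optional
--
-- CLASSIFICATION_HIERARCHY = {
--     "OFFICIAL (OPEN)": 1,          # Lowest - public information
--     "OFFICIAL (CLOSED)": 2,        # Internal communications
--     "RESTRICTED": 3,               # Personal/disciplinary data
--     "CONFIDENTIAL CLOUD-ELIGIBLE": 4  # Highest - sensitive financial/procurement
-- }
--
-- def get_max_classification(classifications: List[str]) -> str:
--     """
--     Get the highest classification level from a list.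
--
--     Args:
--         classifications: List of classification levels
--
--     Returns:
--         Highest classification level
--     """
--     if not classifications:
--         return "OFFICIAL (OPEN)"
--
--     max_level = 0
--     max_classification = "OFFICIAL (OPEN)"
--
--     for classification in classifications:
--         level = CLASSIFICATION_HIERARCHY.get(classification, 0)
--         if level > max_level:
--             max_level = level
--             max_classification = classification
--
--     return max_classification
-- ===== SOURCE B (Python) =====
-- CLASSIFICATION_HIERARCHY = {
--     "OFFICIAL (OPEN)": 1,
--     "OFFICIAL (CLOSED)": 2,
--     "RESTRICTED": 3,
--     "CONFIDENTIAL CLOUD-ELIGIBLE": 4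
-- }
--
-- # Hierarchy names from highest to lowest level.
-- _DESCENDING = sorted(CLASSIFICATION_HIERARCHY, key=CLASSIFICATION_HIERARCHY.get, reverse=True)
--
-- def get_max_classification(classifications):
--     for name in _DESCENDING:
--         if name in classifications:
--             return name
--     return "OFFICIAL (OPEN)"
-- ===== Notes on version B (the rewrite author's own statement) =====
-- stated objective: simpler
-- what changed: B does no max/argmax computation at all: it walks the four hierarchy names in descending level order and returns the first one that occurs in the list (membership tests only), instead of A's single scan threading a numeric max and winning string through an accumulator.
import Mathlib
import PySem

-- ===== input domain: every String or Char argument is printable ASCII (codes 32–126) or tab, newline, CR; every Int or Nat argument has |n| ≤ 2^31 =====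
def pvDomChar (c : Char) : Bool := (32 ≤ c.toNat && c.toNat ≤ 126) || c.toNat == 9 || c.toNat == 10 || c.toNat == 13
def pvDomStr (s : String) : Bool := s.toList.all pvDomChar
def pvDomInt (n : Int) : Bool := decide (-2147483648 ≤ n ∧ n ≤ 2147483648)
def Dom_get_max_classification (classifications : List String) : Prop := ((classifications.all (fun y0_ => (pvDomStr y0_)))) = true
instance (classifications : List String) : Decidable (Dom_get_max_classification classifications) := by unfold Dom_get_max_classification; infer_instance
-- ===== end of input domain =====

-- B returns the first hierarchy name, taken in descending level order, that occurs in the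
-- list (membership tests only), instead of A's accumulator scan (objective: simpler).


-- ===== PORT A =====
-- CLASSIFICATION_HIERARCHY.get(c, 0), shared module constant
def pvHier (s : String) : Int :=
  if s = "OFFICIAL (OPEN)" then 1
  else if s = "OFFICIAL (CLOSED)" then 2
  else if s = "RESTRICTED" then 3
  else if s = "CONFIDENTIAL CLOUD-ELIGIBLE" then 4
  else 0

def get_max_classification (classifications : List String) : String :=
  if classifications = [] then "OFFICIAL (OPEN)"
  else
    (classifications.foldl
      (fun (st : Int × String) classification =>
        let level := pvHier classification
        if level > st.1 then (level, classification) else st)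
      (0, "OFFICIAL (OPEN)")).2

-- ===== PORT B =====
-- _DESCENDING: the hierarchy names sorted by level, highest first (a module constant in Source B)
def pvDescending : List String :=
  ["CONFIDENTIAL CLOUD-ELIGIBLE", "RESTRICTED", "OFFICIAL (CLOSED)", "OFFICIAL (OPEN)"]

-- the for-loop with early return = first name of pvDescending contained in the list
def get_max_classification_alt (classifications : List String) : String :=
  match pvDescending.find? (fun name => classifications.contains name) with
  | some name => name
  | none => "OFFICIAL (OPEN)"

-- ===== PRECONDITION & SPEC =====
def Spec_get_max_classification (classifications : List String) (out : String) : Prop := out = get_max_classification_alt classifications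
instance (classifications : List String) (out : String) : Decidable (Spec_get_max_classification classifications out) := by unfold Spec_get_max_classification; infer_instance

-- ===== CLAIM (what is proved, stated in full; the proofs are below) =====
def Claim_equal_get_max_classification : Prop := ∀ (classifications : List String), Dom_get_max_classification classifications → Spec_get_max_classification classifications (get_max_classification classifications)

-- ===== LEMMAS AND PROOFS =====

-- maximal mapped level of the list, the value A's fold tracks
def pvM (cs : List String) : Int := (cs.map pvHier).foldl max 0

def pvLevelName (n : Int) : String :=
  if n = 1 then "OFFICIAL (OPEN)"
  else if n = 2 then "OFFICIAL (CLOSED)"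
  else if n = 3 then "RESTRICTED"
  else "CONFIDENTIAL CLOUD-ELIGIBLE"

lemma pvHier_nonneg (s : String) : 0 ≤ pvHier s := by
  unfold pvHier; split_ifs <;> norm_num

lemma pvHier_le4 (s : String) : pvHier s ≤ 4 := by
  unfold pvHier; split_ifs <;> norm_num

lemma pvHier_name (s : String) : pvHier s = 0 ∨ s = pvLevelName (pvHier s) := by
  unfold pvHier pvLevelName
  split_ifs with h1 h2 h3 h4 <;> simp_all

-- A's fold produces the (first) argmax name; characterised via pvM
lemma fold_inv (cs : List String) (l : Int) (name : String)
    (h0 : 0 ≤ l)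
    (hname : name = (if l = 0 then "OFFICIAL (OPEN)" else pvLevelName l)) :
    (cs.foldl
      (fun (st : Int × String) c =>
        let level := pvHier c
        if level > st.1 then (level, c) else st)
      (l, name)).2 =
    (if (cs.map pvHier).foldl max l = 0 then "OFFICIAL (OPEN)"
     else pvLevelName ((cs.map pvHier).foldl max l)) := by
  induction cs generalizing l name with
  | nil => simpa using hname
  | cons c cs ih =>
    simp only [List.foldl_cons, List.map_cons]
    by_cases hgt : pvHier c > l
    · rw [if_pos hgt]
      have hmax : max l (pvHier c) = pvHier c := by omega
      rw [hmax]
      apply ih _ _ (by linarith [pvHier_nonneg c])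
      rcases pvHier_name c with h0' | h'
      · omega
      · rw [if_neg (by omega : pvHier c ≠ 0)]; exact h'
    · rw [if_neg hgt]
      have hmax : max l (pvHier c) = l := by
        have := pvHier_nonneg c; omega
      rw [hmax]
      exact ih _ _ h0 hname

lemma init_le_foldl_max (l : List Int) (a : Int) : a ≤ l.foldl max a := by
  induction l generalizing a with
  | nil => simp
  | cons b l ih => exact le_trans (le_max_left a b) (ih _)

lemma mem_le_foldl_max (l : List Int) (a x : Int) (hx : x ∈ l) : x ≤ l.foldl max a := by
  induction l generalizing a with
  | nil => cases hx
  | cons b l ih =>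
    rcases List.mem_cons.mp hx with rfl | h
    · exact le_trans (le_max_right a x) (init_le_foldl_max l _)
    · exact ih _ h

lemma foldl_max_mem (l : List Int) (a : Int) : l.foldl max a = a ∨ l.foldl max a ∈ l := by
  induction l generalizing a with
  | nil => left; rfl
  | cons b l ih =>
    simp only [List.foldl_cons]
    rcases ih (max a b) with h | h
    · rw [h]
      rcases le_total a b with hab | hab
      · right; rw [max_eq_right hab]; exact List.mem_cons_self ..
      · left; rw [max_eq_left hab]
    · right; exact List.mem_cons_of_mem _ h

lemma mem_level_le (cs : List String) (s : String) (h : s ∈ cs) : pvHier s ≤ pvM cs :=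
  mem_le_foldl_max _ _ _ (List.mem_map_of_mem h)

lemma pvM_nonneg (cs : List String) : 0 ≤ pvM cs := by
  unfold pvM
  rcases foldl_max_mem (cs.map pvHier) 0 with h | h
  · omega
  · rcases List.mem_map.mp h with ⟨s, _, hval⟩
    rw [← hval]; exact pvHier_nonneg s

lemma pvM_le4 (cs : List String) : pvM cs ≤ 4 := by
  unfold pvM
  rcases foldl_max_mem (cs.map pvHier) 0 with h | h
  · omega
  · rcases List.mem_map.mp h with ⟨s, _, hval⟩
    rw [← hval]; exact pvHier_le4 s

lemma pvM_attained (cs : List String) (hne : pvM cs ≠ 0) :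
    (pvLevelName (pvM cs)) ∈ cs := by
  simp only [pvM] at hne ⊢
  rcases foldl_max_mem (cs.map pvHier) 0 with h | h
  · exact absurd h hne
  · rcases List.mem_map.mp h with ⟨s, hs, hval⟩
    rcases pvHier_name s with h0 | h'
    · rw [← hval] at hne; exact absurd h0 hne
    · rw [← hval, ← h']; exact hs

lemma not_mem_of_level_gt (cs : List String) (s : String) (h : pvM cs < pvHier s) :
    s ∉ cs := fun hm => absurd (mem_level_le cs s hm) (by omega)

-- compute pvHier on the four names (used implicitly via decide/norm_num below)
lemma B_char (cs : List String) :
    get_max_classification_alt cs =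
      (if pvM cs = 0 then "OFFICIAL (OPEN)" else pvLevelName (pvM cs)) := by
  have hge := pvM_nonneg cs
  have hle := pvM_le4 cs
  have hM : pvM cs = 0 ∨ pvM cs = 1 ∨ pvM cs = 2 ∨ pvM cs = 3 ∨ pvM cs = 4 := by omega
  unfold get_max_classification_alt pvDescending
  simp only [List.find?]
  rcases hM with h | h | h | h | h <;> rw [h]
  · -- no known name occurs
    have h4 : ("CONFIDENTIAL CLOUD-ELIGIBLE" : String) ∉ cs :=
      not_mem_of_level_gt cs _ (by rw [h]; decide)
    have h3 : ("RESTRICTED" : String) ∉ cs :=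
      not_mem_of_level_gt cs _ (by rw [h]; decide)
    have h2 : ("OFFICIAL (CLOSED)" : String) ∉ cs :=
      not_mem_of_level_gt cs _ (by rw [h]; decide)
    have h1 : ("OFFICIAL (OPEN)" : String) ∉ cs :=
      not_mem_of_level_gt cs _ (by rw [h]; decide)
    simp [h4, h3, h2, h1]
  · have hmem : ("OFFICIAL (OPEN)" : String) ∈ cs := by
      have := pvM_attained cs (by rw [h]; decide)
      rw [h] at this; simpa [pvLevelName] using this
    have h4 : ("CONFIDENTIAL CLOUD-ELIGIBLE" : String) ∉ cs :=
      not_mem_of_level_gt cs _ (by rw [h]; decide)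
    have h3 : ("RESTRICTED" : String) ∉ cs :=
      not_mem_of_level_gt cs _ (by rw [h]; decide)
    have h2 : ("OFFICIAL (CLOSED)" : String) ∉ cs :=
      not_mem_of_level_gt cs _ (by rw [h]; decide)
    simp [h4, h3, h2, hmem, pvLevelName]
  · have hmem : ("OFFICIAL (CLOSED)" : String) ∈ cs := by
      have := pvM_attained cs (by rw [h]; decide)
      rw [h] at this; simpa [pvLevelName] using this
    have h4 : ("CONFIDENTIAL CLOUD-ELIGIBLE" : String) ∉ cs :=
      not_mem_of_level_gt cs _ (by rw [h]; decide)
    have h3 : ("RESTRICTED" : String) ∉ cs :=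
      not_mem_of_level_gt cs _ (by rw [h]; decide)
    simp [h4, h3, hmem, pvLevelName]
  · have hmem : ("RESTRICTED" : String) ∈ cs := by
      have := pvM_attained cs (by rw [h]; decide)
      rw [h] at this; simpa [pvLevelName] using this
    have h4 : ("CONFIDENTIAL CLOUD-ELIGIBLE" : String) ∉ cs :=
      not_mem_of_level_gt cs _ (by rw [h]; decide)
    simp [h4, hmem, pvLevelName]
  · have hmem : ("CONFIDENTIAL CLOUD-ELIGIBLE" : String) ∈ cs := by
      have := pvM_attained cs (by rw [h]; decide)
      rw [h] at this; simpa [pvLevelName] using this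
    simp [hmem, pvLevelName]

-- ===== VERDICT (by name: the statement is the Claim_ definition above) =====
theorem get_max_classification_spec : Claim_equal_get_max_classification := by
  intro cs _
  unfold Spec_get_max_classification
  rw [B_char]
  unfold get_max_classification
  by_cases h : cs = []
  · subst h; simp [pvM]
  · rw [if_neg h]
    exact fold_inv cs 0 "OFFICIAL (OPEN)" le_rfl (by simp)
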